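-- pv_equiv track=rewrite | github.com/BuhaiovDmytro/Createnko | src/services/trend_analysis_service.py | _analyze_text_length_distribution
-- ===== SOURCE A (Python) =====
-- from typing import Dict, Any, List, Optional, Union
--
-- def _analyze_text_length_distribution(ads_data: List[Dict[str, Any]]) -> Dict[str, int]:
--     """Analyze text length distribution."""
--     lengths = [len(ad.get('body', '')) for ad in ads_data if ad.get('body')]
--
--     if not lengths:
--         return {}
--
--     # Categorize by length
--     categories = {
--         'short (0-50)': len([l for l in lengths if l <= 50]),
--         'medium (51-150)': len([l for l in lengths if 51 <= l <= 150]),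
--         'long (151+)': len([l for l in lengths if l > 150])
--     }
--
--     return categories
-- ===== SOURCE B (Python) =====
-- from typing import Dict, Any, List
--
-- def _analyze_text_length_distribution(ads_data: List[Dict[str, Any]]) -> Dict[str, int]:
--     """Single-pass bucket count of ad body lengths."""
--     short = medium = long_ = 0
--     seen = False
--     for ad in ads_data:
--         body = ad.get('body')
--         if body:
--             seen = True
--             l = len(body)
--             if l <= 50:
--                 short += 1
--             elif l <= 150:
--                 medium += 1
--             else:
--                 long_ += 1
--     if not seen:
--         return {}
--     return {
--         'short (0-50)': short,
--         'medium (51-150)': medium,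
--         'long (151+)': long_,
--     }
-- ===== Notes on version B (the rewrite author's own statement) =====
-- stated objective: simpler
-- what changed: Replaced the lengths list and three separate filtering comprehensions with one single-pass loop that increments exactly one of three counters per ad.
import Mathlib
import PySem

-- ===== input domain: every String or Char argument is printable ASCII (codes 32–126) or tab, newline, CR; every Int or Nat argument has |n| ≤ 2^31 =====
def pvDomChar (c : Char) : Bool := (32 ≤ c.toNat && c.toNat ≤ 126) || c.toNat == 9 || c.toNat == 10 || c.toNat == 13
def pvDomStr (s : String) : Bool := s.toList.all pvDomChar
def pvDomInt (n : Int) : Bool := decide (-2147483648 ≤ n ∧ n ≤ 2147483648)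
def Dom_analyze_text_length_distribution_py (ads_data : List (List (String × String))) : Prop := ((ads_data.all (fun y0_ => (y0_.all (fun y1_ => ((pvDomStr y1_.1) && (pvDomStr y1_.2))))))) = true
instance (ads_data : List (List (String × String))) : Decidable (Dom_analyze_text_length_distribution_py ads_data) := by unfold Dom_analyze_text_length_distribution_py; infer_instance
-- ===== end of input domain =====

-- One honest line: B fuses A's four scans (one lengths comprehension + three filters)
-- into a single pass with three counters and a seen flag; objective: simpler.

-- ===== PORT A =====
-- ad.get('body') : first-match association-list lookup (Python dict → assoc list)
def pvBodyGet? (ad : List (String × String)) : Option String := ad.lookup "body"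

-- truthiness of ad.get('body'): present and non-empty
def pvBodyTruthy (ad : List (String × String)) : Bool :=
  match pvBodyGet? ad with
  | some s => s ≠ ""
  | none => false

def analyze_text_length_distribution_py (ads_data : List (List (String × String))) : List (String × Int) :=
  let lengths : List Int :=
    (ads_data.filter pvBodyTruthy).map (fun ad => PySem.Str.len ((pvBodyGet? ad).getD ""))
  if lengths = [] then []
  else
    [("short (0-50)", ((lengths.filter (fun l => decide (l ≤ 50))).length : Int)),
     ("medium (51-150)", ((lengths.filter (fun l => decide (51 ≤ l ∧ l ≤ 150))).length : Int)),
     ("long (151+)", ((lengths.filter (fun l => decide (l > 150))).length : Int))]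

-- ===== PORT B =====
-- single-pass state: (short, medium, long, seen)
def pvAltStep (st : Int × Int × Int × Bool) (ad : List (String × String)) : Int × Int × Int × Bool :=
  match ad.lookup "body" with
  | some body =>
      if body ≠ "" then
        let l := PySem.Str.len body
        if l ≤ 50 then (st.1 + 1, st.2.1, st.2.2.1, true)
        else if l ≤ 150 then (st.1, st.2.1 + 1, st.2.2.1, true)
        else (st.1, st.2.1, st.2.2.1 + 1, true)
      else st
  | none => st

def analyze_text_length_distribution_py_alt (ads_data : List (List (String × String))) : List (String × Int) :=
  let st := ads_data.foldl pvAltStep (0, 0, 0, false)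
  if st.2.2.2 = false then []
  else
    [("short (0-50)", st.1),
     ("medium (51-150)", st.2.1),
     ("long (151+)", st.2.2.1)]

-- ===== PRECONDITION & SPEC =====
def Spec_analyze_text_length_distribution_py (ads_data : List (List (String × String))) (out : List (String × Int)) : Prop := out = analyze_text_length_distribution_py_alt ads_data
instance (ads_data : List (List (String × String))) (out : List (String × Int)) : Decidable (Spec_analyze_text_length_distribution_py ads_data out) := by unfold Spec_analyze_text_length_distribution_py; infer_instance

-- ===== CLAIM (what is proved, stated in full; the proofs are below) =====
def Claim_equal_analyze_text_length_distribution_py : Prop := ∀ (ads_data : List (List (String × String))), Dom_analyze_text_length_distribution_py ads_data → Spec_analyze_text_length_distribution_py ads_data (analyze_text_length_distribution_py ads_data)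

-- ===== LEMMAS AND PROOFS =====

-- A's lengths list
def pvLens (ads : List (List (String × String))) : List Int :=
  (ads.filter pvBodyTruthy).map (fun ad => PySem.Str.len ((pvBodyGet? ad).getD ""))

-- the invariant of B's fold, in terms of A's lengths
lemma pvFold_spec (ads : List (List (String × String))) :
    ∀ s m lo b, ads.foldl pvAltStep (s, m, lo, b) =
      (s + ((pvLens ads).filter (fun l => decide (l ≤ 50))).length,
       m + ((pvLens ads).filter (fun l => decide (51 ≤ l ∧ l ≤ 150))).length,
       lo + ((pvLens ads).filter (fun l => decide (l > 150))).length,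
       b || !(pvLens ads).isEmpty) := by
  induction ads with
  | nil => intro s m lo b; simp [pvLens]
  | cons ad rest ih =>
    intro s m lo b
    by_cases ht : pvBodyTruthy ad = true
    · have hsome : ∃ body, pvBodyGet? ad = some body ∧ body ≠ "" := by
        unfold pvBodyTruthy at ht
        cases h : pvBodyGet? ad with
        | none => simp [h] at ht
        | some s' => rw [h] at ht; exact ⟨s', rfl, by simpa using ht⟩
      obtain ⟨body, hb, hne⟩ := hsome
      have hL : pvLens (ad :: rest) = PySem.Str.len body :: pvLens rest := by
        simp [pvLens, ht, hb]
      rw [List.foldl_cons]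
      have hstep : pvAltStep (s, m, lo, b) ad =
          (if PySem.Str.len body ≤ 50 then (s + 1, m, lo, true)
           else if PySem.Str.len body ≤ 150 then (s, m + 1, lo, true)
           else (s, m, lo + 1, true)) := by
        unfold pvAltStep pvBodyGet? at *
        rw [hb]
        simp [hne]
      rw [hstep]
      have f1 : (PySem.Str.len body :: pvLens rest).filter (fun l => decide (l ≤ 50)) =
          (if PySem.Str.len body ≤ 50 then [PySem.Str.len body] else []) ++ (pvLens rest).filter (fun l => decide (l ≤ 50)) := by
        rw [List.filter_cons]; simp only [decide_eq_true_eq]; split_ifs <;> simp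
      have f2 : (PySem.Str.len body :: pvLens rest).filter (fun l => decide (51 ≤ l ∧ l ≤ 150)) =
          (if 51 ≤ PySem.Str.len body ∧ PySem.Str.len body ≤ 150 then [PySem.Str.len body] else []) ++ (pvLens rest).filter (fun l => decide (51 ≤ l ∧ l ≤ 150)) := by
        rw [List.filter_cons]; simp only [decide_eq_true_eq]; split_ifs <;> simp
      have f3 : (PySem.Str.len body :: pvLens rest).filter (fun l => decide (l > 150)) =
          (if PySem.Str.len body > 150 then [PySem.Str.len body] else []) ++ (pvLens rest).filter (fun l => decide (l > 150)) := by
        rw [List.filter_cons]; simp only [decide_eq_true_eq]; split_ifs <;> simp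
      rw [hL]
      split_ifs with h50 h150 <;>
      · rw [ih, f1, f2, f3]
        simp only [Prod.mk.injEq, List.isEmpty_cons, Bool.not_false, Bool.or_true]
        split_ifs <;> simp_all <;> omega
    · have hL : pvLens (ad :: rest) = pvLens rest := by
        simp [pvLens, ht]
      have hstep : pvAltStep (s, m, lo, b) ad = (s, m, lo, b) := by
        unfold pvBodyTruthy at ht
        unfold pvAltStep
        cases h : pvBodyGet? ad with
        | none => unfold pvBodyGet? at h; rw [h]
        | some s' =>
          rw [h] at ht
          unfold pvBodyGet? at h
          rw [h]
          simp only [ne_eq, decide_not, Bool.not_eq_true'] at ht ⊢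
          simp at ht
          simp [ht]
      rw [List.foldl_cons, hstep, ih, hL]

-- ===== VERDICT (by name: the statement is the Claim_ definition above) =====
theorem analyze_text_length_distribution_py_spec : Claim_equal_analyze_text_length_distribution_py := by
  intro ads _
  show analyze_text_length_distribution_py ads = analyze_text_length_distribution_py_alt ads
  unfold analyze_text_length_distribution_py analyze_text_length_distribution_py_alt
  rw [show (ads.filter pvBodyTruthy).map (fun ad => PySem.Str.len ((pvBodyGet? ad).getD "")) = pvLens ads from rfl]
  rw [pvFold_spec ads 0 0 0 false]
  by_cases hE : pvLens ads = []
  · simp [hE]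
  · simp only [hE]
    have : (pvLens ads).isEmpty = false := by simpa [List.isEmpty_iff] using hE
    simp [this]
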